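-- pv_equiv track=rewrite | github.com/mattr555/advent-of-code | 2019/day16.py | runPhase2
-- ===== SOURCE A (Python) =====
-- def runPhase2(l):
--     prefixes = []
--     acc = 0
--     for i in l:
--         prefixes.append(acc)
--         acc += i
--     prefixes.append(acc)
--
--     ret = []
--     for position in range(len(l)):
--         ans = 0
--         sign = 1
--         for offset in range(position, len(l), (position+1) * 2):
--             ans += sign * (prefixes[min(position+offset+1, len(prefixes)-1)] - prefixes[offset])
--             sign *= -1
--         ret.append(abs(ans) % 10)
--     return ret
-- ===== SOURCE B (Python) =====
-- def runPhase2(l):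
--     n = len(l)
--     base = [0, 1, 0, -1]
--     ret = []
--     for position in range(n):
--         total = 0
--         for i in range(n):
--             total += l[i] * base[((i + 1) // (position + 1)) % 4]
--         ret.append(abs(total) % 10)
--     return ret
-- ===== Notes on version B (the rewrite author's own statement) =====
-- stated objective: idiomatic
-- what changed: Replaced the prefix-sum table with strided block jumps and an alternating-sign accumulator by the textbook FFT phase: for each output position, a single full scan multiplying every element by its pattern coefficient base[((i+1)//(p+1))%4].
import Mathlib
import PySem

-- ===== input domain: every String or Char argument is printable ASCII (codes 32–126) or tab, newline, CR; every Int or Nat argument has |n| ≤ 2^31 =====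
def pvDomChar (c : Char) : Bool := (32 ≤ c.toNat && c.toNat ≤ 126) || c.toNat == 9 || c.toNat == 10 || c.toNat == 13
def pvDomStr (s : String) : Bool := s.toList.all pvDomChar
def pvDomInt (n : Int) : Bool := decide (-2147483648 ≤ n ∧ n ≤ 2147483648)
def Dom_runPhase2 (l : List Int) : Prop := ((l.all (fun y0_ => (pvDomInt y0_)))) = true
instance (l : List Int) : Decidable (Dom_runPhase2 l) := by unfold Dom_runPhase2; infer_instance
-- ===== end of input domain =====

-- B replaces A's prefix-sum table and strided alternating block jumps by the textbook
-- pattern-multiply FFT phase (one full scan per output position); objective: idiomatic.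


-- ===== PORT A =====
-- literal port of Source A: prefix sums built by a fold, then for each position a strided
-- loop over offsets with an alternating sign; the prefixes[...] indices are always in
-- range, ported with PySem.List.pyGetD.
def runPhase2 (l : List Int) : List Int :=
  let pr := l.foldl (fun (st : List Int × Int) i => (st.1 ++ [st.2], st.2 + i)) (([] : List Int), 0)
  let prefixes := pr.1 ++ [pr.2]
  (List.range l.length).map (fun (position : Nat) =>
    let r := (PySem.List.pyRange (position : Int) (l.length : Int) (((position : Int) + 1) * 2)).foldl
      (fun (st : Int × Int) offset =>
        (st.1 + st.2 * (PySem.List.pyGetD prefixes (min ((position : Int) + offset + 1) (PySem.List.len prefixes - 1)) 0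
                        - PySem.List.pyGetD prefixes offset 0),
         st.2 * (-1)))
      (0, 1)
    PySem.Int.mod |r.1| 10)

-- ===== PORT B =====
-- literal port of Source B: for each position one full scan multiplying each element by its
-- pattern coefficient; l[i] and base[...] are always in range, ported with getD; Python's
-- // and % on these nonnegative operands are Nat / and %.
def runPhase2_alt (l : List Int) : List Int :=
  let n := l.length
  let base : List Int := [0, 1, 0, -1]
  (List.range n).map (fun position =>
    let total := (List.range n).foldl
      (fun acc i => acc + l.getD i 0 * base.getD (((i + 1) / (position + 1)) % 4) 0) 0
    PySem.Int.mod |total| 10)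

-- ===== PRECONDITION & SPEC =====
def Spec_runPhase2 (l : List Int) (out : List Int) : Prop := out = runPhase2_alt l
instance (l : List Int) (out : List Int) : Decidable (Spec_runPhase2 l out) := by unfold Spec_runPhase2; infer_instance

-- ===== CLAIM (what is proved, stated in full; the proofs are below) =====
def Claim_equal_runPhase2 : Prop := ∀ (l : List Int), Dom_runPhase2 l → Spec_runPhase2 l (runPhase2 l)

-- ===== LEMMAS AND PROOFS =====

-- prefix sum of the first j elements (what A's `prefixes[j]` holds)
def pvP (l : List Int) (j : ℕ) : ℤ := (l.take j).sum

-- B's summand: element times pattern coefficient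
def pvG (l : List Int) (p i : ℕ) : ℤ :=
  l.getD i 0 * ([0, 1, 0, -1] : List ℤ).getD (((i + 1) / (p + 1)) % 4) 0

-- A's inner loop with the sign factored out: pvAS o = Δ(o) - pvAS (o + step)
def pvAS (l : List Int) (p o : ℕ) : ℤ :=
  if o < l.length then
    (pvP l (min (o + p + 1) l.length) - pvP l o) - pvAS l p (o + (p + 1) * 2)
  else 0
termination_by l.length - o
decreasing_by omega

lemma pv_prefix_fold (l : List Int) : ∀ (ps : List Int) (acc : Int),
    l.foldl (fun (st : List Int × Int) i => (st.1 ++ [st.2], st.2 + i)) (ps, acc)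
      = (ps ++ (List.range l.length).map (fun j => acc + pvP l j), acc + l.sum) := by
  induction l with
  | nil => intro ps acc; simp [pvP]
  | cons x t ih =>
      intro ps acc
      simp only [List.foldl_cons]
      rw [ih (ps ++ [acc]) (acc + x)]
      refine Prod.ext ?_ (by simp [add_assoc])
      simp only [List.length_cons, List.range_succ_eq_map, List.map_cons, List.map_map]
      simp [pvP, Function.comp, add_assoc]

lemma pv_pyRange_pos_nil (a b s : ℤ) (hs : 0 < s) (h : b ≤ a) :
    PySem.List.pyRange a b s = [] := by
  rw [PySem.List.pyRange_of_pos a b hs]; simp; omega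

lemma pv_pyRange_pos_cons (a b s : ℤ) (hs : 0 < s) (hab : a < b) :
    PySem.List.pyRange a b s = a :: PySem.List.pyRange (a + s) b s := by
  rw [PySem.List.pyRange_of_pos a b hs, PySem.List.pyRange_of_pos (a + s) b hs]
  have hc : (0:ℤ) ≤ b - a - 1 := by omega
  have hdiv : (b - a + s - 1) / s = (b - a - 1) / s + 1 := by
    have : b - a + s - 1 = (b - a - 1) + 1 * s := by ring
    rw [this, Int.add_mul_ediv_right _ _ (by omega)]
  have hnn : (0:ℤ) ≤ (b - a - 1) / s := Int.ediv_nonneg hc (le_of_lt hs)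
  have hm : (if a < b then ((b - a + s - 1) / s).toNat else 0)
      = (if a + s < b then ((b - (a + s) + s - 1) / s).toNat else 0) + 1 := by
    by_cases h2 : a + s < b
    · simp only [if_pos hab, if_pos h2, hdiv]
      have : b - (a + s) + s - 1 = b - a - 1 := by ring
      rw [this]
      omega
    · simp only [if_pos hab, if_neg h2, hdiv]
      have : (b - a - 1) / s = 0 := Int.ediv_eq_zero_of_lt hc (by omega)
      omega
  rw [hm, List.range_succ_eq_map, List.map_cons, List.map_map]
  congr 1
  · simp
  · apply List.map_congr_left
    intro k _
    simp [Function.comp, Nat.succ_eq_add_one]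
    ring

-- the fold over A's strided range computes acc + σ * pvAS
lemma pv_foldA (l : List Int) (p : ℕ) (prefixes : List Int)
    (hpre : prefixes = (List.range (l.length + 1)).map (fun j => pvP l j)) :
    ∀ (fuel o : ℕ) (acc σ : ℤ), l.length - o ≤ fuel →
    ((PySem.List.pyRange (o : Int) (l.length : Int) (((p : Int) + 1) * 2)).foldl
      (fun (st : Int × Int) offset =>
        (st.1 + st.2 * (PySem.List.pyGetD prefixes (min ((p : Int) + offset + 1) (PySem.List.len prefixes - 1)) 0
                        - PySem.List.pyGetD prefixes offset 0),
         st.2 * (-1)))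
      (acc, σ)).1 = acc + σ * pvAS l p o := by
  intro fuel
  induction fuel with
  | zero =>
      intro o acc σ hf
      rw [pv_pyRange_pos_nil _ _ _ (by positivity) (by exact_mod_cast by omega)]
      rw [pvAS]
      simp [if_neg (by omega : ¬ o < l.length)]
  | succ fuel ih =>
      intro o acc σ hf
      by_cases ho : o < l.length
      · rw [pv_pyRange_pos_cons _ _ _ (by positivity) (by exact_mod_cast ho)]
        rw [List.foldl_cons]
        have hcast : (o : ℤ) + ((p : ℤ) + 1) * 2 = ((o + (p + 1) * 2 : ℕ) : ℤ) := by push_cast; ring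
        rw [hcast, ih (o + (p + 1) * 2) _ _ (by omega)]
        have hlen : PySem.List.len prefixes = (l.length : ℤ) + 1 := by
          simp [hpre, PySem.List.len_eq]
        have hidx1 : min ((p : ℤ) + (o : ℤ) + 1) (PySem.List.len prefixes - 1)
            = ((min (o + p + 1) l.length : ℕ) : ℤ) := by
          rw [hlen]; push_cast [Nat.cast_min]; omega
        have hget1 : PySem.List.pyGetD prefixes (((min (o + p + 1) l.length : ℕ) : ℤ)) 0
            = pvP l (min (o + p + 1) l.length) := by
          rw [PySem.List.pyGetD_natCast, hpre, PySem.List.getD_map_range _ _ _ _ (by omega)]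
        have hget2 : PySem.List.pyGetD prefixes ((o : ℕ) : ℤ) 0 = pvP l o := by
          rw [PySem.List.pyGetD_natCast, hpre, PySem.List.getD_map_range _ _ _ _ (by omega)]
        rw [hidx1, hget1, hget2]
        conv_rhs => rw [pvAS]
        rw [if_pos ho]
        ring
      · rw [pv_pyRange_pos_nil _ _ _ (by positivity) (by exact_mod_cast by omega)]
        rw [pvAS]
        simp [if_neg ho]

lemma pv_sum_Ico_getD (l : List Int) : ∀ (a b : ℕ), a ≤ b →
    (∑ i ∈ Finset.Ico a b, l.getD i 0) = pvP l (min b l.length) - pvP l (min a l.length) := by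
  intro a b hab
  induction b, hab using Nat.le_induction with
  | base => simp
  | succ b hab ih =>
      rw [Finset.sum_Ico_succ_top hab, ih]
      by_cases hb : b < l.length
      · have h1 : min (b + 1) l.length = b + 1 := by omega
        have h2 : min b l.length = b := by omega
        rw [h1, h2]
        rw [List.getD_eq_getElem?_getD, List.getElem?_eq_getElem hb]
        have hstep : pvP l (b + 1) = pvP l b + l[b] := by
          unfold pvP
          rw [List.take_add_one, List.sum_append, List.getElem?_eq_getElem hb]
          simp
        rw [hstep, Option.getD_some]
        ring
      · have h1 : min (b + 1) l.length = l.length := by omega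
        have h2 : min b l.length = l.length := by omega
        rw [h1, h2]
        simp [List.getD_eq_getElem?_getD, List.getElem?_eq_none (by omega : l.length ≤ b)]

-- zero pattern coefficient: i+1 lies in an even block of width p+1
lemma pvG_eq_zero (l : List Int) (p j i : ℕ)
    (h1 : (p + 1) * 2 * j ≤ i + 1) (h2 : i + 1 < (p + 1) * 2 * j + (p + 1)) :
    pvG l p i = 0 := by
  have h1' : 2 * j * (p + 1) ≤ i + 1 := by
    rw [show 2 * j * (p + 1) = (p + 1) * 2 * j from by ring]; exact h1
  have h2' : i + 1 < (2 * j + 1) * (p + 1) := by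
    rw [show (2 * j + 1) * (p + 1) = (p + 1) * 2 * j + (p + 1) from by ring]; exact h2
  have hq : (i + 1) / (p + 1) = 2 * j := Nat.div_eq_of_lt_le h1' h2'
  have : (2 * j) % 4 = 0 ∨ (2 * j) % 4 = 2 := by omega
  unfold pvG
  rw [hq]
  rcases this with h | h <;> rw [h] <;> simp

-- alternating pattern coefficient: i+1 lies in the j-th odd block
lemma pvG_block (l : List Int) (p j i : ℕ)
    (h1 : (p + 1) * 2 * j + (p + 1) ≤ i + 1) (h2 : i + 1 < (p + 1) * 2 * j + (p + 1) + (p + 1)) :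
    pvG l p i = (-1 : ℤ) ^ j * l.getD i 0 := by
  have h1' : (2 * j + 1) * (p + 1) ≤ i + 1 := by
    rw [show (2 * j + 1) * (p + 1) = (p + 1) * 2 * j + (p + 1) from by ring]; exact h1
  have h2' : i + 1 < (2 * j + 1 + 1) * (p + 1) := by
    rw [show (2 * j + 1 + 1) * (p + 1) = (p + 1) * 2 * j + (p + 1) + (p + 1) from by ring]; exact h2
  have hq : (i + 1) / (p + 1) = 2 * j + 1 := Nat.div_eq_of_lt_le h1' h2'
  unfold pvG
  rw [hq]
  rcases Nat.even_or_odd j with he | ho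
  · have h4 : (2 * j + 1) % 4 = 1 := by
      obtain ⟨m, hm⟩ := he; omega
    rw [h4, he.neg_one_pow]; simp
  · have h4 : (2 * j + 1) % 4 = 3 := by
      obtain ⟨m, hm⟩ := ho; omega
    rw [h4, ho.neg_one_pow]; simp

-- main bridge: B's suffix sum from a block boundary equals (-1)^k times A's remaining loop
lemma pv_main (l : List Int) (p : ℕ) : ∀ (fuel k z : ℕ), z = (p + 1) * 2 * k →
    l.length - (p + z) ≤ fuel →
    (∑ i ∈ Finset.Ico z l.length, pvG l p i) = (-1 : ℤ) ^ k * pvAS l p (p + z) := by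
  intro fuel
  induction fuel with
  | zero =>
      intro k z hz hf
      have hn : l.length ≤ p + z := by omega
      rw [pvAS, if_neg (by omega)]
      rw [Finset.sum_eq_zero, mul_zero]
      intro i hi
      rw [Finset.mem_Ico] at hi
      exact pvG_eq_zero l p k i (by omega) (by omega)
  | succ fuel ih =>
      intro k z hz hf
      by_cases ho : p + z < l.length
      · have hz'k : z + (p + 1) * 2 = (p + 1) * 2 * (k + 1) := by rw [hz]; ring
        rw [← Finset.sum_Ico_consecutive (fun i => pvG l p i)
              (show z ≤ p + z by omega) (le_of_lt ho)]
        rw [← Finset.sum_Ico_consecutive (fun i => pvG l p i)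
              (show p + z ≤ min (p + z + p + 1) l.length by omega)
              (show min (p + z + p + 1) l.length ≤ l.length by omega)]
        have hpre : (∑ i ∈ Finset.Ico z (p + z), pvG l p i) = 0 :=
          Finset.sum_eq_zero (fun i hi => by
            rw [Finset.mem_Ico] at hi
            exact pvG_eq_zero l p k i (by omega) (by omega))
        have hblk : (∑ i ∈ Finset.Ico (p + z) (min (p + z + p + 1) l.length), pvG l p i)
            = (-1 : ℤ) ^ k * (pvP l (min (p + z + p + 1) l.length) - pvP l (p + z)) := by
          calc (∑ i ∈ Finset.Ico (p + z) (min (p + z + p + 1) l.length), pvG l p i)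
              = ∑ i ∈ Finset.Ico (p + z) (min (p + z + p + 1) l.length),
                  (-1 : ℤ) ^ k * l.getD i 0 :=
                Finset.sum_congr rfl (fun i hi => by
                  rw [Finset.mem_Ico] at hi
                  exact pvG_block l p k i (by omega) (by omega))
            _ = (-1 : ℤ) ^ k * ∑ i ∈ Finset.Ico (p + z) (min (p + z + p + 1) l.length),
                  l.getD i 0 := by rw [Finset.mul_sum]
            _ = (-1 : ℤ) ^ k * (pvP l (min (p + z + p + 1) l.length) - pvP l (p + z)) := by
                  rw [pv_sum_Ico_getD l _ _ (by omega),
                    show min (min (p + z + p + 1) l.length) l.length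
                        = min (p + z + p + 1) l.length from by omega,
                    show min (p + z) l.length = p + z from by omega]
        have htail : (∑ i ∈ Finset.Ico (min (p + z + p + 1) l.length) l.length, pvG l p i)
            = ∑ i ∈ Finset.Ico (z + (p + 1) * 2) l.length, pvG l p i := by
          by_cases hcase : p + z + p + 1 < l.length
          · have h1 : (∑ i ∈ Finset.Ico (min (p + z + p + 1) l.length) l.length, pvG l p i)
                = pvG l p (min (p + z + p + 1) l.length)
                  + ∑ i ∈ Finset.Ico (min (p + z + p + 1) l.length + 1) l.length, pvG l p i :=
              Finset.sum_eq_sum_Ico_succ_bot (by omega) _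
            have h0 : pvG l p (min (p + z + p + 1) l.length) = 0 :=
              pvG_eq_zero l p (k + 1) _ (by rw [← hz'k]; omega) (by rw [← hz'k]; omega)
            rw [h1, h0, zero_add,
              show min (p + z + p + 1) l.length + 1 = z + (p + 1) * 2 from by omega]
          · rw [show min (p + z + p + 1) l.length = l.length from by omega,
                Finset.Ico_self, Finset.sum_empty,
                Finset.Ico_eq_empty (by omega), Finset.sum_empty]
        rw [hpre, hblk, htail,
            ih (k + 1) (z + (p + 1) * 2) hz'k (by omega)]
        conv_rhs => rw [pvAS]
        rw [if_pos ho]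
        rw [show p + (z + (p + 1) * 2) = p + z + (p + 1) * 2 from by omega]
        ring
      · rw [pvAS, if_neg ho]
        rw [Finset.sum_eq_zero, mul_zero]
        intro i hi
        rw [Finset.mem_Ico] at hi
        exact pvG_eq_zero l p k i (by omega) (by omega)

-- ===== VERDICT (by name: the statement is the Claim_ definition above) =====
theorem runPhase2_spec : Claim_equal_runPhase2 := by
  unfold Claim_equal_runPhase2 Spec_runPhase2
  intro l _
  unfold runPhase2 runPhase2_alt
  simp only []
  apply List.map_congr_left
  intro p _
  have hprefix : (l.foldl (fun (st : List Int × Int) i => (st.1 ++ [st.2], st.2 + i))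
        (([] : List Int), 0)).1
      ++ [(l.foldl (fun (st : List Int × Int) i => (st.1 ++ [st.2], st.2 + i))
        (([] : List Int), 0)).2]
      = (List.range (l.length + 1)).map (fun j => pvP l j) := by
    rw [pv_prefix_fold l [] 0]
    simp only [List.nil_append, zero_add]
    rw [List.range_succ, List.map_append, List.map_cons, List.map_nil]
    congr 1
    simp [pvP]
  rw [pv_foldA l p _ hprefix l.length p 0 1 (by omega)]
  have hB : (List.range l.length).foldl
      (fun acc i => acc + l.getD i 0 * ([0, 1, 0, -1] : List ℤ).getD (((i + 1) / (p + 1)) % 4) 0) 0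
      = ∑ i ∈ Finset.Ico 0 l.length, pvG l p i := by
    rw [PySem.List.foldl_add (List.range l.length)
      (fun i => l.getD i 0 * ([0, 1, 0, -1] : List ℤ).getD (((i + 1) / (p + 1)) % 4) 0) 0]
    rw [← Finset.range_eq_Ico]
    simp only [zero_add]
    rfl
  rw [hB, pv_main l p l.length 0 0 (by ring) (by omega)]
  simp only [pow_zero, one_mul, zero_add, Nat.add_zero]
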